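-- pv_equiv track=rewrite | github.com/palmerscott254-gif/portfolio | apps/backend/app/main.py | answer_from_context
-- ===== SOURCE A (Python) =====
-- def answer_from_context(query: str, docs: list[dict[str, str]]) -> str:
--     fragments = []
--     for doc in docs:
--         chunks = [segment.strip() for segment in doc["text"].split("\n") if segment.strip()]
--         fragments.extend(chunks[:4])
--
--     if not fragments:
--         return "I do not have enough indexed context yet."
--
--     query_terms = [q for q in query.lower().split() if len(q) > 2]
--     ranked = sorted(
--         fragments,
--         key=lambda fragment: sum(1 for term in query_terms if term in fragment.lower()),
--         reverse=True,
--     )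
--     selected = ranked[:3]
--     synthesis = " ".join(selected)
--     return (
--         "Newton: "
--         f"{synthesis} "
--         "I design resilient systems with measurable performance, reliability, and clear operational traces."
--     )
-- ===== SOURCE B (Python) =====
-- def answer_from_context(query: str, docs: list[dict[str, str]]) -> str:
--     fragments = []
--     for doc in docs:
--         chunk = []
--         for segment in doc["text"].split("\n"):
--             s = segment.strip()
--             if s and len(chunk) < 4:
--                 chunk.append(s)
--         fragments += chunk
--
--     if not fragments:
--         return "I do not have enough indexed context yet."
--
--     terms = [t for t in query.lower().split() if len(t) > 2]
--
--     # bucket the fragments by score (original order kept inside each bucket),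
--     # then walk the buckets from highest score down and keep the first 3
--     buckets = {}
--     for frag in fragments:
--         low = frag.lower()
--         sc = 0
--         for t in terms:
--             if t in low:
--                 sc += 1
--         buckets.setdefault(sc, []).append(frag)
--
--     selected = []
--     for sc in sorted(buckets, reverse=True):
--         for frag in buckets[sc]:
--             if len(selected) < 3:
--                 selected.append(frag)
--
--     synthesis = " ".join(selected)
--     return (
--         "Newton: "
--         f"{synthesis} "
--         "I design resilient systems with measurable performance, reliability, and clear operational traces."
--     )
-- ===== Notes on version B (the rewrite author's own statement) =====
-- stated objective: alternative
-- what changed: Replaces the full stable comparison sort of fragments with score buckets (a dict score->fragments built in one pass) walked from the highest score down taking the first 3, and replaces the comprehension+slice chunking with a counter loop.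
import Mathlib
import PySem

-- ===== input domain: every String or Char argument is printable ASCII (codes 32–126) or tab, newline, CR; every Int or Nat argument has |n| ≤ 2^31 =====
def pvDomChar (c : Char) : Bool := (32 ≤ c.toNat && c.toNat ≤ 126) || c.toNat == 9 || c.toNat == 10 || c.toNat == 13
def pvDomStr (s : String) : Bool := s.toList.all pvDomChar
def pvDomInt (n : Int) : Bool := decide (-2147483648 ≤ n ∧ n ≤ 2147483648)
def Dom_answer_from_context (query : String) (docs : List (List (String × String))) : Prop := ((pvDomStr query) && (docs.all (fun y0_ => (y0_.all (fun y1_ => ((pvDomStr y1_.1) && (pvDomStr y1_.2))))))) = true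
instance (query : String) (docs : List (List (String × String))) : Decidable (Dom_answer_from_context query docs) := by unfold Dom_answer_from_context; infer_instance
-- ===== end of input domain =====

-- B replaces A's full stable reverse sort + slice by score buckets (a dict score → fragments
-- in original order) walked from the highest score down taking the first 3, and replaces the
-- comprehension+slice chunking by a counter loop; same return value.

-- ===== PORT A =====
-- fragments loop of A: foldl over docs, KeyError on a missing "text" key = none
def pvFragsA (docs : List (List (String × String))) : Option (List String) :=
  docs.foldl
    (fun acc doc => acc.bind (fun frags =>
      (PySem.Dict.get? (PySem.Dict.mk doc) "text").map (fun text =>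
        frags ++ ((((PySem.Str.split? text "\n").getD []).filter
                    (fun seg => PySem.Str.strip seg ≠ "")).map PySem.Str.strip).take 4)))
    (some [])

-- sum(1 for term in query_terms if term in fragment.lower())
def pvScoreA (query_terms : List String) (fragment : String) : Nat :=
  (query_terms.map (fun term => if PySem.Str.isIn term (PySem.Str.lower fragment) then 1 else 0)).sum

def answer_from_context (query : String) (docs : List (List (String × String))) : String :=
  match pvFragsA docs with
  | none => ""   -- KeyError in Python; excluded by Pre_
  | some fragments =>
    if fragments = [] then "I do not have enough indexed context yet."
    else
      let query_terms := (PySem.Str.split₀ (PySem.Str.lower query)).filter (fun q => 2 < PySem.Str.len q)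
      let ranked := PySem.List.sorted fragments (fun fragment => pvScoreA query_terms fragment) true
      let selected := ranked.take 3
      let synthesis := PySem.Str.join " " selected
      "Newton: " ++ synthesis ++ " I design resilient systems with measurable performance, reliability, and clear operational traces."

-- ===== PORT B =====
-- inner counter loop of B: append stripped non-empty segments while the chunk holds < 4
def pvChunkB (text : String) : List String :=
  ((PySem.Str.split? text "\n").getD []).foldl
    (fun ch seg =>
      let s := PySem.Str.strip seg
      if s ≠ "" ∧ ch.length < 4 then ch ++ [s] else ch) []

-- fragments loop of B (fragments += chunk); KeyError on a missing "text" key = none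
def pvFragsB (docs : List (List (String × String))) : Option (List String) :=
  docs.foldl
    (fun acc doc => acc.bind (fun frags =>
      (PySem.Dict.get? (PySem.Dict.mk doc) "text").map (fun text => frags ++ pvChunkB text)))
    (some [])

-- sc = 0; for t in terms: if t in low: sc += 1
def pvScoreB (terms : List String) (fragment : String) : Nat :=
  let low := PySem.Str.lower fragment
  terms.foldl (fun sc t => if PySem.Str.isIn t low then sc + 1 else sc) 0

-- buckets.setdefault(sc, []).append(frag)  ==  buckets[sc] = buckets.get(sc, []) + [frag]
def pvBuckets (terms : List String) (fragments : List String) : PySem.Dict Nat (List String) :=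
  fragments.foldl (fun d frag => d.modify (pvScoreB terms frag) [] (· ++ [frag])) PySem.Dict.empty

def answer_from_context_alt (query : String) (docs : List (List (String × String))) : String :=
  match pvFragsB docs with
  | none => ""   -- KeyError in Python; excluded by Pre_
  | some fragments =>
    if fragments = [] then "I do not have enough indexed context yet."
    else
      let terms := (PySem.Str.split₀ (PySem.Str.lower query)).filter (fun t => 2 < PySem.Str.len t)
      let buckets := pvBuckets terms fragments
      -- for sc in sorted(buckets, reverse=True): for frag in buckets[sc]: if len(selected) < 3: append
      -- (buckets[sc] is getD: sc ranges over the dict's own keys, so the lookup never fails)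
      let selected :=
        (PySem.List.sorted buckets.keys (fun v => v) true).foldl
          (fun sel v => (buckets.getD v []).foldl
            (fun sel frag => if sel.length < 3 then sel ++ [frag] else sel) sel) []
      let synthesis := PySem.Str.join " " selected
      "Newton: " ++ synthesis ++ " I design resilient systems with measurable performance, reliability, and clear operational traces."

-- ===== PRECONDITION & SPEC =====
-- Pre_ excludes exactly the inputs where Python A raises KeyError: a doc without a "text" key.
def Pre_answer_from_context (query : String) (docs : List (List (String × String))) : Prop :=
  docs.all (fun doc => doc.any (fun kv => kv.1 == "text")) = true
instance (query : String) (docs : List (List (String × String))) : Decidable (Pre_answer_from_context query docs) := by unfold Pre_answer_from_context; infer_instance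

def pvWitness_answer_from_context : String × (List (List (String × String))) :=
  ("the cat sat", [[("text", "the cat\n\n dog "), ("x", "y")], [("text", "sat")]])

def Spec_answer_from_context (query : String) (docs : List (List (String × String))) (out : String) : Prop := out = answer_from_context_alt query docs
instance (query : String) (docs : List (List (String × String))) (out : String) : Decidable (Spec_answer_from_context query docs out) := by unfold Spec_answer_from_context; infer_instance

-- ===== CLAIM (what is proved, stated in full; the proofs are below) =====
def Claim_equal_answer_from_context : Prop := ∀ (query : String) (docs : List (List (String × String))), Dom_answer_from_context query docs → Pre_answer_from_context query docs → Spec_answer_from_context query docs (answer_from_context query docs)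

-- ===== LEMMAS AND PROOFS =====

-- the two score loops agree
theorem pvScore_aux (low : String) (l : List String) (n : Nat) :
    l.foldl (fun sc t => if PySem.Str.isIn t low then sc + 1 else sc) n
      = n + (l.map (fun t => if PySem.Str.isIn t low then 1 else 0)).sum := by
  induction l generalizing n with
  | nil => simp
  | cons t l ih =>
    simp only [List.foldl_cons, List.map_cons, List.sum_cons]
    split <;> rw [ih] <;> omega

theorem pvScore_eq (terms : List String) (f : String) : pvScoreB terms f = pvScoreA terms f := by
  unfold pvScoreB pvScoreA
  rw [pvScore_aux]
  omega

-- B's counter loop, from a chunk with ≤ 4 entries, is A's filter/strip comprehension sliced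
theorem pvChunkFold (segs : List String) (ch : List String) (h : ch.length ≤ 4) :
    segs.foldl
      (fun ch seg =>
        let s := PySem.Str.strip seg
        if s ≠ "" ∧ ch.length < 4 then ch ++ [s] else ch) ch
      = ch ++ (((segs.filter (fun seg => PySem.Str.strip seg ≠ "")).map PySem.Str.strip).take (4 - ch.length)) := by
  induction segs generalizing ch with
  | nil => simp
  | cons seg segs ih =>
    simp only [List.foldl_cons, List.filter_cons]
    by_cases hs : PySem.Str.strip seg = ""
    · simp only [hs, ne_eq, not_true_eq_false, false_and, if_false, decide_false,
        Bool.false_eq_true]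
      rw [ih ch h]
    · by_cases hlen : ch.length < 4
      · rw [if_pos ⟨hs, hlen⟩, ih (ch ++ [PySem.Str.strip seg]) (by simp; omega)]
        rw [if_pos (by simp [hs])]
        simp only [List.map_cons, List.length_append, List.length_cons, List.length_nil]
        have h4 : 4 - ch.length = (4 - (ch.length + 1)) + 1 := by omega
        rw [h4, List.take_succ_cons]
        simp
      · rw [if_neg (by tauto), ih ch h, if_pos (by simp [hs])]
        have h0 : 4 - ch.length = 0 := by omega
        simp [h0]

theorem pvFrags_eq (docs : List (List (String × String))) : pvFragsB docs = pvFragsA docs := by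
  have hch : ∀ text, pvChunkB text
      = ((((PySem.Str.split? text "\n").getD []).filter
            (fun seg => PySem.Str.strip seg ≠ "")).map PySem.Str.strip).take 4 := by
    intro text
    unfold pvChunkB
    rw [pvChunkFold _ [] (by simp)]
    simp
  unfold pvFragsB pvFragsA
  apply PySem.List.foldl_congr_mem
  intro acc doc _
  simp only [hch]

-- insertBy passes over a block it does not go before
theorem pvInsertBy_append {α : Type} (before : α → α → Bool) (x : α) (l1 l2 : List α)
    (h : ∀ y ∈ l1, before x y = false) :
    PySem.List.insertBy before x (l1 ++ l2) = l1 ++ PySem.List.insertBy before x l2 := by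
  induction l1 with
  | nil => simp
  | cons y l1 ih =>
    have hy : before x y = false := h y (by simp)
    simp only [List.cons_append, PySem.List.insertBy, hy, Bool.false_eq_true, if_false]
    rw [ih (fun z hz => h z (by simp [hz]))]

-- insertBy goes in front of a block it goes before
theorem pvInsertBy_front {α : Type} (before : α → α → Bool) (x : α) (l : List α)
    (h : ∀ y ∈ l, before x y = true) :
    PySem.List.insertBy before x l = x :: l := by
  cases l with
  | nil => rfl
  | cons y l => simp [PySem.List.insertBy, h y (by simp)]

-- bucket concatenation: the fragments of p, grouped by the scores of vs in order
def pvBC (S : String → Nat) (vs : List Nat) (p : List String) : List String :=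
  vs.flatMap (fun v => p.filter (fun x => S x == v))

theorem pvBC_cons (S : String → Nat) (v : Nat) (vs : List Nat) (p : List String) :
    pvBC S (v :: vs) p = p.filter (fun x => S x == v) ++ pvBC S vs p := by
  simp [pvBC]

theorem pvBC_snoc_notin (S : String → Nat) (vs : List Nat) (p : List String) (x : String)
    (h : S x ∉ vs) : pvBC S vs (p ++ [x]) = pvBC S vs p := by
  induction vs with
  | nil => simp [pvBC]
  | cons v vs ih =>
    have hv : (S x == v) = false := by simp; intro hc; exact h (by simp [hc])
    rw [pvBC_cons, pvBC_cons, ih (fun hc => h (by simp [hc]))]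
    simp [List.filter_append, hv]

theorem pvBC_mem_score (S : String → Nat) (vs : List Nat) (p : List String) (y : String)
    (h : y ∈ pvBC S vs p) : S y ∈ vs := by
  unfold pvBC at h
  rcases List.mem_flatMap.mp h with ⟨v, hv, hy⟩
  have := List.of_mem_filter hy
  simp at this
  simpa [this] using hv

-- inserting x into a bucket concatenation appends it at the end of its own bucket
theorem pvInsert_bucket (S : String → Nat) (vs : List Nat) (p : List String) (x : String)
    (hs : vs.Pairwise (fun a b => b < a)) (hx : S x ∈ vs) :
    PySem.List.insertBy (fun a b => decide (S b < S a)) x (pvBC S vs p) = pvBC S vs (p ++ [x]) := by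
  induction vs generalizing p with
  | nil => simp at hx
  | cons v vs ih =>
    rcases List.pairwise_cons.mp hs with ⟨hv, hs'⟩
    rw [pvBC_cons, pvBC_cons]
    by_cases hxv : S x = v
    · rw [pvInsertBy_append _ _ _ _ (by
        intro y hy
        have := List.of_mem_filter hy
        simp at this
        simp [this, hxv])]
      rw [pvInsertBy_front _ _ _ (by
        intro y hy
        have := pvBC_mem_score S vs p y hy
        simp [hxv]
        exact hv _ this)]
      have hnv : S x ∉ vs := by
        intro hc
        exact absurd (hv _ hc) (by omega)
      rw [pvBC_snoc_notin S vs p x hnv]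
      simp [List.filter_append, hxv]
    · have hx' : S x ∈ vs := by rcases List.mem_cons.mp hx with h | h; exact absurd h hxv; exact h
      rw [pvInsertBy_append _ _ _ _ (by
        intro y hy
        have := List.of_mem_filter hy
        simp at this
        have : v < S x → False := by intro hc; exact absurd (hv _ hx') (by omega)
        simp_all)]
      rw [ih p hs' hx']
      have hfx : (S x == v) = false := by simp [hxv]
      simp [List.filter_append, hfx]

theorem pvBucket_fold (S : String → Nat) (vs : List Nat)
    (hs : vs.Pairwise (fun a b => b < a)) :
    ∀ (xs p : List String), (∀ x ∈ xs, S x ∈ vs) →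
    xs.foldl (fun acc x => PySem.List.insertBy (fun a b => decide (S b < S a)) x acc) (pvBC S vs p)
      = pvBC S vs (p ++ xs) := by
  intro xs
  induction xs with
  | nil => intro p _; simp
  | cons x xs ih =>
    intro p hmem
    simp only [List.foldl_cons]
    rw [pvInsert_bucket S vs p x hs (hmem x (by simp))]
    rw [ih (p ++ [x]) (fun z hz => hmem z (by simp [hz]))]
    simp

-- A's stable reverse insertion sort IS the bucket concatenation
theorem pvBucket_sort (S : String → Nat) (xs : List String) (vs : List Nat)
    (hs : vs.Pairwise (fun a b => b < a)) (hmem : ∀ x ∈ xs, S x ∈ vs) :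
    PySem.List.sorted xs S true = pvBC S vs xs := by
  rw [PySem.List.sorted_rev_eq_foldl_insertBy]
  have h0 : pvBC S vs [] = [] := by simp [pvBC]
  have := pvBucket_fold S vs hs xs [] hmem
  rw [h0] at this
  simpa using this

-- a bucket of B's dict holds exactly the fragments with that score, in order
theorem pvBuckets_getD_aux (S : String → Nat) (frags : List String) (d : PySem.Dict Nat (List String)) (v : Nat) :
    (frags.foldl (fun d frag => d.modify (S frag) [] (· ++ [frag])) d).getD v []
      = d.getD v [] ++ frags.filter (fun f => S f == v) := by
  induction frags generalizing d with
  | nil => simp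
  | cons f fs ih =>
    simp only [List.foldl_cons, List.filter_cons]
    rw [ih]
    rw [PySem.Dict.getD_modify]
    by_cases hfv : S f = v
    · simp [hfv]
    · have hvf : ¬ (v = S f) := fun hc => hfv hc.symm
      have hbe : (S f == v) = false := by simp [hfv]
      simp [hvf, hbe]

theorem pvBuckets_getD (terms : List String) (fragments : List String) (v : Nat) :
    (pvBuckets terms fragments).getD v []
      = fragments.filter (fun f => pvScoreB terms f == v) := by
  unfold pvBuckets
  rw [pvBuckets_getD_aux]
  simp

theorem pvBuckets_keys (terms : List String) (fragments : List String) :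
    (pvBuckets terms fragments).keys = PySem.Set.ofList (fragments.map (pvScoreB terms)) := by
  unfold pvBuckets
  rw [PySem.Dict.keys_foldl_modify_key fragments (pvScoreB terms) [] (fun _ frag => (· ++ [frag]))]
  rfl

-- the guarded selection loop over the buckets takes the first 3 of the concatenation
theorem pvTakeFold (l sel : List String) (h : sel.length ≤ 3) :
    l.foldl (fun sel frag => if sel.length < 3 then sel ++ [frag] else sel) sel
      = sel ++ l.take (3 - sel.length) := by
  induction l generalizing sel with
  | nil => simp
  | cons f l ih =>
    simp only [List.foldl_cons]
    by_cases hlen : sel.length < 3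
    · rw [if_pos hlen, ih (sel ++ [f]) (by simp; omega)]
      have h4 : 3 - sel.length = (3 - (sel.length + 1)) + 1 := by omega
      rw [h4, List.take_succ_cons]
      simp
    · rw [if_neg hlen, ih sel h]
      have h0 : 3 - sel.length = 0 := by omega
      simp [h0]

theorem pvSelect_eq (g : Nat → List String) (vs : List Nat) (sel : List String) (h : sel.length ≤ 3) :
    vs.foldl (fun sel v => (g v).foldl
        (fun sel frag => if sel.length < 3 then sel ++ [frag] else sel) sel) sel
      = sel ++ (vs.flatMap g).take (3 - sel.length) := by
  induction vs generalizing sel with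
  | nil => simp
  | cons v vs ih =>
    simp only [List.foldl_cons, List.flatMap_cons]
    rw [pvTakeFold _ _ h]
    have hlen : (sel ++ (g v).take (3 - sel.length)).length ≤ 3 := by
      simp [List.length_append, List.length_take]
      omega
    rw [ih _ hlen, List.take_append]
    have hl : (sel ++ (g v).take (3 - sel.length)).length
        = sel.length + min (3 - sel.length) ((g v).length) := by simp
    have hc : 3 - (sel.length + min (3 - sel.length) ((g v).length))
        = 3 - sel.length - (g v).length := by omega
    rw [hl, hc]
    simp [List.append_assoc]

-- ===== VERDICT (by name: the statement is the Claim_ definition above) =====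
theorem answer_from_context_spec : Claim_equal_answer_from_context := by
  intro query docs _ _
  unfold Spec_answer_from_context answer_from_context answer_from_context_alt
  rw [pvFrags_eq]
  cases hf : pvFragsA docs with
  | none => rfl
  | some fragments =>
    by_cases hnil : fragments = []
    · simp [hnil]
    · simp only [if_neg hnil]
      set terms := (PySem.Str.split₀ (PySem.Str.lower query)).filter (fun t => 2 < PySem.Str.len t) with hterms
      set S := pvScoreB terms with hS
      set vs := PySem.List.sorted (pvBuckets terms fragments).keys (fun v => v) true with hvs
      have hnd : (pvBuckets terms fragments).keys.Nodup := by
        rw [pvBuckets_keys]; exact PySem.Set.nodup_ofList _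
      have hndvs : vs.Nodup :=
        (PySem.List.sorted_perm (pvBuckets terms fragments).keys (fun v => v) true).symm.nodup hnd
      have hpw : vs.Pairwise (fun a b => b < a) := by
        have hle := PySem.List.sorted_pairwise_rev (pvBuckets terms fragments).keys (fun v => v)
        exact (hle.and hndvs).imp (fun h => lt_of_le_of_ne h.1 (Ne.symm h.2))
      have hmem : ∀ x ∈ fragments, S x ∈ vs := by
        intro x hx
        rw [hvs, PySem.List.mem_sorted, pvBuckets_keys, PySem.Set.mem_ofList]
        exact List.mem_map_of_mem hx
      have hkey : (fun fragment => pvScoreA terms fragment) = S := by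
        funext f; rw [hS, pvScore_eq]
      have hsorted : PySem.List.sorted fragments (fun fragment => pvScoreA terms fragment) true
          = pvBC S vs fragments := by
        rw [hkey]; exact pvBucket_sort S fragments vs hpw hmem
      have hsel := pvSelect_eq (fun v => (pvBuckets terms fragments).getD v []) vs [] (by simp)
      simp only [List.nil_append, List.length_nil, Nat.sub_zero] at hsel
      rw [hsel]
      have hflat : vs.flatMap (fun v => (pvBuckets terms fragments).getD v []) = pvBC S vs fragments := by
        unfold pvBC
        exact List.flatMap_congr (fun v _ => pvBuckets_getD terms fragments v)
      rw [hflat, hsorted]
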